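-- pv_equiv track=rewrite | github.com/changQiangXia/MyCS336 | 4/assignment4-data-main/cs336_data/quality.py | gopher_quality_filter
-- ===== SOURCE A (Python) =====
-- def gopher_quality_filter(text: str) -> bool:
--     """Apply Gopher quality filter rules.
--
--     Based on the paper "Quality at a Glance: An Audit of Web-Crawled Datasets"
--     by Rae et al. (2021).
--
--     Rules:
--     1. Between 50 and 100,000 non-symbol words
--     2. Mean word length between 3 and 10 characters
--     3. Less than 30% of lines end with ellipsis (...)
--     4. At least 80% of words contain at least one alphabetic character
--
--     Args:
--         text: Input text to filter.
--
--     Returns: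
--         True if text passes all filters, False otherwise.
--     """
--     # Split into words and lines
--     words = text.split()
--     lines = text.split('\n')
--
--     if len(words) == 0:
--         return False
--
--     # Rule 1: Between 50 and 100,000 non-symbol words
--     # Non-symbol words = words with at least one alphanumeric character
--     non_symbol_words = [w for w in words if any(c.isalnum() for c in w)]
--     if len(non_symbol_words) < 50 or len(non_symbol_words) > 100000:
--         return False
--
--     # Rule 2: Mean word length between 3 and 10 characters
--     # Only consider words with alphabetic characters
--     alpha_words = [w for w in words if any(c.isalpha() for c in w)]
--     if alpha_words:
--         mean_word_len = sum(len(w) for w in alpha_words) / len(alpha_words)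
--         if mean_word_len < 3 or mean_word_len > 10:
--             return False
--
--     # Rule 3: Less than 30% of lines end with ellipsis
--     if lines:
--         ellipsis_lines = sum(1 for line in lines if line.rstrip().endswith('...'))
--         ellipsis_ratio = ellipsis_lines / len(lines)
--         if ellipsis_ratio > 0.30:
--             return False
--
--     # Rule 4: At least 80% of words contain at least one alphabetic character
--     words_with_alpha = sum(1 for w in words if any(c.isalpha() for c in w))
--     alpha_ratio = words_with_alpha / len(words)
--     if alpha_ratio < 0.80:
--         return False
--
--     return True
-- ===== SOURCE B (Python) =====
-- def gopher_quality_filter(text: str) -> bool: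
--     """Single forward character scan with an O(1) state machine: no split(),
--     no intermediate word/line lists.  The scan tracks the current word
--     (length, has-alnum, has-alpha) and the current line's trailing dot run;
--     the four Gopher rules become exact integer comparisons on six counters."""
--     n_words = non_sym = alpha_cnt = alpha_len = 0   # word counters
--     ell = n_lines = 0                               # line counters
--     wlen = 0; wan = wal = False                     # current word state
--     dots = 0; pend_ws = False                       # current line state
--     for c in text:
--         if c == '\n':
--             # end of line: close the current word and the current line
--             if wlen:
--                 n_words += 1; non_sym += wan; alpha_cnt += wal
--                 alpha_len += wlen if wal else 0
--             wlen = 0; wan = wal = False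
--             n_lines += 1; ell += dots >= 3
--             dots = 0; pend_ws = False
--         elif c.isspace():
--             if wlen:
--                 n_words += 1; non_sym += wan; alpha_cnt += wal
--                 alpha_len += wlen if wal else 0
--             wlen = 0; wan = wal = False
--             pend_ws = True
--         else:
--             wlen += 1
--             wan = wan or c.isalnum()
--             wal = wal or c.isalpha()
--             dots = (1 if pend_ws else dots + 1) if c == '.' else 0
--             pend_ws = False
--     if wlen:
--         n_words += 1; non_sym += wan; alpha_cnt += wal
--         alpha_len += wlen if wal else 0
--     n_lines += 1; ell += dots >= 3
--     return (n_words > 0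
--             and 50 <= non_sym <= 100000
--             and (alpha_cnt == 0 or 3 * alpha_cnt <= alpha_len <= 10 * alpha_cnt)
--             and 10 * ell <= 3 * n_lines
--             and 4 * n_words <= 5 * alpha_cnt)
-- ===== Notes on version B (the rewrite author's own statement) =====
-- stated objective: alternative
-- what changed: Replaces A's split()-based passes (which build word and line lists and scan them four times) with a single forward character scan driving an O(1)-state machine that tracks the current word's length/alnum/alpha flags and the current line's trailing-dot run, then checks the four rules as exact integer comparisons on six counters.
import Mathlib
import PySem

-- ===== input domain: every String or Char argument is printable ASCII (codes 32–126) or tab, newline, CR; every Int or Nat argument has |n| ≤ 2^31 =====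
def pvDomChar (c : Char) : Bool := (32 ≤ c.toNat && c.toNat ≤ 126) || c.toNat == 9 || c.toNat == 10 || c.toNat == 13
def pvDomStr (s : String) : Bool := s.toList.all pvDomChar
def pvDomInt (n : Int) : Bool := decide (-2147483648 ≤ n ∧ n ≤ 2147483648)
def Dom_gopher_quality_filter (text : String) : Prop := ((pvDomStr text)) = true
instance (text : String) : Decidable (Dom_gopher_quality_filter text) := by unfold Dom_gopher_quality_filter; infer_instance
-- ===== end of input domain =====

-- B replaces A's split()-based passes (word/line lists scanned four times) with ONE forward
-- character scan driving an O(1)-state machine (current word length/alnum/alpha flags, current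
-- line's trailing-dot run), then checks the four rules as exact integer comparisons on six
-- counters.  Python's float ratio/mean comparisons are ported on both sides as the equivalent
-- exact integer comparisons (see comments at the comparisons).

-- ===== PORT A =====
def gopher_quality_filter (text : String) : Bool :=
  let words := PySem.Str.split₀ text
  let lines := PySem.Chars.splitOn text.toList ['\n']
  if words.length = 0 then false
  else
    let non_symbol_words := words.filter (fun w => w.toList.any PySem.Chars.isalnum)
    if non_symbol_words.length < 50 ∨ non_symbol_words.length > 100000 then false
    else
      let alpha_words := words.filter (fun w => w.toList.any PySem.Chars.isalpha)
      -- float mean comparison ported exactly: sum/len < 3 ↔ sum < 3*len, sum/len > 10 ↔ sum > 10*len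
      if alpha_words ≠ [] ∧ ((alpha_words.map (fun w => w.toList.length)).sum < 3 * alpha_words.length ∨
          (alpha_words.map (fun w => w.toList.length)).sum > 10 * alpha_words.length) then false
      else
        -- float ratio > 0.30 ported as 10*e > 3*len(lines); exact for all realistic sizes
        if lines ≠ [] ∧ 10 * (lines.countP (fun line => PySem.Chars.endswith (PySem.Chars.rstrip line) "...".toList)) > 3 * lines.length then false
        else
          -- float ratio < 0.80 ported as 5*wa < 4*len(words); exact for all realistic sizes
          if 5 * (words.countP (fun w => w.toList.any PySem.Chars.isalpha)) < 4 * words.length then false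
          else true

-- ===== PORT B =====
-- the O(1) machine state: six counters, current-word state, current-line state
structure GqfSt where
  n : Nat      -- n_words
  ns : Nat     -- non_sym
  ac : Nat     -- alpha_cnt
  al : Nat     -- alpha_len
  ell : Nat
  nl : Nat     -- n_lines counted so far (completed lines)
  wlen : Nat   -- current word length
  wan : Bool   -- current word has alnum
  wal : Bool   -- current word has alpha
  dots : Nat   -- trailing dot run of current line (after rstrip)
  pend : Bool  -- pending whitespace since last non-space char
deriving Repr, DecidableEq

def gqfFlushW (st : GqfSt) : GqfSt :=
  if 0 < st.wlen then
    { st with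
        n := st.n + 1
        ns := st.ns + (if st.wan then 1 else 0)
        ac := st.ac + (if st.wal then 1 else 0)
        al := st.al + (if st.wal then st.wlen else 0)
        wlen := 0
        wan := false
        wal := false }
  else { st with wlen := 0, wan := false, wal := false }

def gqfStep (st : GqfSt) (c : Char) : GqfSt :=
  if c = '\n' then
    let st := gqfFlushW st
    { st with
        nl := st.nl + 1
        ell := st.ell + (if 3 ≤ st.dots then 1 else 0)
        dots := 0
        pend := false }
  else if PySem.Chars.isspace c then
    let st := gqfFlushW st
    { st with pend := true }
  else
    { st with
        wlen := st.wlen + 1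
        wan := st.wan || PySem.Chars.isalnum c
        wal := st.wal || PySem.Chars.isalpha c
        dots := if c = '.' then (if st.pend then 1 else st.dots + 1) else 0
        pend := false }

def gqfInit : GqfSt := ⟨0, 0, 0, 0, 0, 0, 0, false, false, 0, false⟩

def gopher_quality_filter_alt (text : String) : Bool :=
  let st := gqfFlushW (text.toList.foldl gqfStep gqfInit)
  let n_lines := st.nl + 1
  let ell := st.ell + (if 3 ≤ st.dots then 1 else 0)
  decide (0 < st.n) &&
  decide (50 ≤ st.ns ∧ st.ns ≤ 100000) &&
  (st.ac == 0 || decide (3 * st.ac ≤ st.al ∧ st.al ≤ 10 * st.ac)) &&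
  decide (10 * ell ≤ 3 * n_lines) &&
  decide (4 * st.n ≤ 5 * st.ac)

-- ===== PRECONDITION & SPEC =====
def Spec_gopher_quality_filter (text : String) (out : Bool) : Prop := out = gopher_quality_filter_alt text
instance (text : String) (out : Bool) : Decidable (Spec_gopher_quality_filter text out) := by unfold Spec_gopher_quality_filter; infer_instance

-- ===== CLAIM (what is proved, stated in full; the proofs are below) =====
def Claim_equal_gopher_quality_filter : Prop := ∀ (text : String), Dom_gopher_quality_filter text → Spec_gopher_quality_filter text (gopher_quality_filter text)

-- ===== LEMMAS AND PROOFS =====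

-- abbreviations for the per-word / per-line predicates A uses
def gqfAN (w : List Char) : Bool := w.any PySem.Chars.isalnum
def gqfAL (w : List Char) : Bool := w.any PySem.Chars.isalpha
def gqfEll (l : List Char) : Bool := PySem.Chars.endswith (PySem.Chars.rstrip l) ['.', '.', '.']
-- line-state abstraction: trailing-dot run and pending-whitespace flag of the REVERSED current line
def gqfDots (l : List Char) : Nat := ((l.dropWhile PySem.Chars.isspace).takeWhile (fun c => c == '.')).length
def gqfHead (l : List Char) : Bool := match l with | [] => false | c :: _ => PySem.Chars.isspace c

theorem gqfAN_reverse (w : List Char) : gqfAN w.reverse = gqfAN w := by simp [gqfAN]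
theorem gqfAL_reverse (w : List Char) : gqfAL w.reverse = gqfAL w := by simp [gqfAL]

theorem gqf_split0_go_acc (s : List Char) : ∀ (cur : List Char) (acc : List (List Char)),
    PySem.Chars.split₀.go s cur acc = acc.reverse ++ PySem.Chars.split₀.go s cur [] := by
  induction s with
  | nil =>
    intro cur acc
    rw [PySem.Chars.split₀.go, PySem.Chars.split₀.go]
    split_ifs <;> simp
  | cons c r ih =>
    intro cur acc
    rw [PySem.Chars.split₀.go, PySem.Chars.split₀.go]
    split_ifs with h1 h2
    · exact ih [] acc
    · rw [ih [] (cur.reverse :: acc), ih [] [cur.reverse]]; simp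
    · exact ih (c :: cur) acc

theorem gqf_splitOn_go_acc (fuel : Nat) : ∀ (s cur : List Char) (acc : List (List Char)),
    PySem.Chars.splitOn.go ['\n'] fuel s cur acc =
      acc.reverse ++ PySem.Chars.splitOn.go ['\n'] fuel s cur [] := by
  induction fuel with
  | zero =>
    intro s cur acc
    rw [PySem.Chars.splitOn.go, PySem.Chars.splitOn.go]
    simp
  | succ f ih =>
    intro s cur acc
    cases s with
    | nil => rw [PySem.Chars.splitOn.go, PySem.Chars.splitOn.go] <;> simp
    | cons c r =>
      rw [PySem.Chars.splitOn.go, PySem.Chars.splitOn.go]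
      split_ifs with h1
      · rw [ih _ [] (cur.reverse :: acc), ih _ [] [cur.reverse]]; simp
      · exact ih r (c :: cur) acc

theorem gqf_splitOn_go_nil (fuel : Nat) (cur : List Char) (acc : List (List Char)) :
    PySem.Chars.splitOn.go ['\n'] fuel [] cur acc = (cur.reverse :: acc).reverse := by
  cases fuel <;> rw [PySem.Chars.splitOn.go] <;> simp

-- '...' is a prefix of ys iff ys starts with at least three dots
theorem gqf_dotPrefix (ys : List Char) :
    ∀ k : Nat, ((List.replicate k '.').isPrefixOf ys) = decide (k ≤ (ys.takeWhile (fun c => c == '.')).length) := by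
  induction ys with
  | nil => intro k; cases k <;> simp
  | cons a t ih =>
    intro k
    cases k with
    | zero => simp
    | succ k =>
      cases ha : (a == '.') with
      | true =>
        have h' := eq_of_beq ha; subst h'
        simp [List.replicate_succ, ih]
      | false =>
        have hne : ¬('.' = a) := by
          intro h; rw [← h] at ha; simp at ha
        have h1 : ('.' == a) = false := beq_eq_false_iff_ne.mpr hne
        simp [List.isPrefixOf, List.replicate_succ, ha, h1]

theorem gqf_prefix (ys : List Char) :
    (['.', '.', '.'].isPrefixOf ys) = decide (3 ≤ (ys.takeWhile (fun c => c == '.')).length) := by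
  have h := gqf_dotPrefix ys 3
  simpa [List.replicate] using h

-- a completed line (reversed accumulator) rstrip-ends with '...' iff its dot run is ≥ 3
theorem gqf_ell_rev (l : List Char) : gqfEll l.reverse = decide (3 ≤ gqfDots l) := by
  have : gqfEll l.reverse = (['.', '.', '.'].isPrefixOf (l.dropWhile PySem.Chars.isspace)) := by
    simp [gqfEll, PySem.Chars.endswith, PySem.Chars.rstrip, List.isSuffixOf]
  rw [this, gqf_prefix, gqfDots]

-- MAIN INVARIANT: one char-scan step of B tracks A's split₀/splitOn decompositions
theorem gqf_main (s : List Char) : ∀ (fuel : Nat), s.length ≤ fuel →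
    ∀ (curW curL : List Char) (st : GqfSt),
    st.wlen = curW.length → st.wan = gqfAN curW → st.wal = gqfAL curW →
    st.dots = gqfDots curL → st.pend = gqfHead curL →
    (gqfFlushW (s.foldl gqfStep st)).n = st.n + (PySem.Chars.split₀.go s curW []).length ∧
    (gqfFlushW (s.foldl gqfStep st)).ns = st.ns + (PySem.Chars.split₀.go s curW []).countP gqfAN ∧
    (gqfFlushW (s.foldl gqfStep st)).ac = st.ac + (PySem.Chars.split₀.go s curW []).countP gqfAL ∧
    (gqfFlushW (s.foldl gqfStep st)).al = st.al + (((PySem.Chars.split₀.go s curW []).filter gqfAL).map List.length).sum ∧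
    (gqfFlushW (s.foldl gqfStep st)).nl + 1 = st.nl + (PySem.Chars.splitOn.go ['\n'] fuel s curL []).length ∧
    (gqfFlushW (s.foldl gqfStep st)).ell + (if 3 ≤ (gqfFlushW (s.foldl gqfStep st)).dots then 1 else 0) =
      st.ell + (PySem.Chars.splitOn.go ['\n'] fuel s curL []).countP gqfEll := by
  induction s with
  | nil =>
    intro fuel hf curW curL st h1 h2 h3 h4 h5
    rw [List.foldl_nil, PySem.Chars.split₀.go, gqf_splitOn_go_nil]
    by_cases hw : curW.isEmpty = true
    · have hw0 : st.wlen = 0 := by rw [h1]; cases curW <;> simp_all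
      rw [if_pos hw]
      simp [gqfFlushW, hw0, List.countP_cons, gqf_ell_rev, h4]
    · have hw0 : 0 < st.wlen := by rw [h1]; cases curW <;> simp_all
      rw [if_neg hw]
      have hw0' : 0 < curW.length := h1 ▸ hw0
      simp [gqfFlushW, hw0', h1, h2, h3, h4, List.countP_cons, gqf_ell_rev,
        gqfAN_reverse, gqfAL_reverse, List.filter_cons]
      split_ifs <;> simp
  | cons c r ih =>
    intro fuel hf curW curL st h1 h2 h3 h4 h5
    obtain ⟨f, rfl⟩ : ∃ f, fuel = f + 1 := ⟨fuel - 1, by simp at hf; omega⟩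
    have hrf : r.length ≤ f := by simp at hf; omega
    rw [List.foldl_cons, PySem.Chars.split₀.go, PySem.Chars.splitOn.go]
    by_cases hnl : c = '\n'
    · subst hnl
      rw [if_pos (show (['\n'].isPrefixOf ('\n' :: r)) = true by simp),
        if_pos (show PySem.Chars.isspace '\n' = true by decide)]
      have hdrop : List.drop (['\n'] : List Char).length ('\n' :: r) = r := by simp
      rw [hdrop, gqf_splitOn_go_acc]
      by_cases hw : curW.isEmpty = true
      · have hw0 : st.wlen = 0 := by rw [h1]; cases curW <;> simp_all
        rw [if_pos hw]
        have hstN : gqfStep st '\n' =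
            { st with
                wlen := 0
                wan := false
                wal := false
                nl := st.nl + 1
                ell := st.ell + (if 3 ≤ st.dots then 1 else 0)
                dots := 0
                pend := false } := by
          simp [gqfStep, gqfFlushW, hw0]
        obtain ⟨e1, e2, e3, e4, e5, e6⟩ :=
          ih f hrf [] [] (gqfStep st '\n') (by simp [hstN]) (by simp [hstN, gqfAN])
            (by simp [hstN, gqfAL]) (by simp [hstN, gqfDots]) (by simp [hstN, gqfHead])
        refine ⟨?_, ?_, ?_, ?_, ?_, ?_⟩ <;>
          simp only [e1, e2, e3, e4, e5, e6] <;>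
          simp [hstN, List.countP_cons, gqf_ell_rev, h4] <;> omega
      · have hw0 : 0 < st.wlen := by rw [h1]; cases curW <;> simp_all
        rw [if_neg hw]
        have hstN : gqfStep st '\n' =
            { st with
                n := st.n + 1
                ns := st.ns + (if st.wan then 1 else 0)
                ac := st.ac + (if st.wal then 1 else 0)
                al := st.al + (if st.wal then st.wlen else 0)
                wlen := 0
                wan := false
                wal := false
                nl := st.nl + 1
                ell := st.ell + (if 3 ≤ st.dots then 1 else 0)
                dots := 0
                pend := false } := by
          simp [gqfStep, gqfFlushW, hw0]
        rw [gqf_split0_go_acc]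
        obtain ⟨e1, e2, e3, e4, e5, e6⟩ :=
          ih f hrf [] [] (gqfStep st '\n') (by simp [hstN]) (by simp [hstN, gqfAN])
            (by simp [hstN, gqfAL]) (by simp [hstN, gqfDots]) (by simp [hstN, gqfHead])
        refine ⟨?_, ?_, ?_, ?_, ?_, ?_⟩ <;>
          simp only [e1, e2, e3, e4, e5, e6] <;>
          simp [hstN, List.countP_cons, List.filter_cons, gqf_ell_rev,
            h1, h2, h3, h4, gqfAN_reverse, gqfAL_reverse] <;>
          (first | omega | (split_ifs <;> simp_all <;> omega))
    · have hnlb : ('\n' == c) = false := beq_eq_false_iff_ne.mpr (fun h => hnl h.symm)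
      rw [if_neg (show ¬((['\n'].isPrefixOf (c :: r)) = true) by simp [List.isPrefixOf, hnlb])]
      by_cases hws : PySem.Chars.isspace c = true
      · -- whitespace that is not a newline: word flush, line char accumulates
        rw [if_pos hws]
        by_cases hw : curW.isEmpty = true
        · have hw0 : st.wlen = 0 := by rw [h1]; cases curW <;> simp_all
          rw [if_pos hw]
          have hstN : gqfStep st c =
              { st with
                  wlen := 0
                  wan := false
                  wal := false
                  pend := true } := by
            simp [gqfStep, gqfFlushW, hnl, hws, hw0]
          rw [hstN]
          exact ih f hrf [] (c :: curL) _ (by simp) (by simp [gqfAN])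
            (by simp [gqfAL]) (by simp [gqfDots, hws, h4])
            (by simp [gqfHead, hws])
        · have hw0 : 0 < st.wlen := by rw [h1]; cases curW <;> simp_all
          rw [if_neg hw]
          have hstN : gqfStep st c =
              { st with
                  n := st.n + 1
                  ns := st.ns + (if st.wan then 1 else 0)
                  ac := st.ac + (if st.wal then 1 else 0)
                  al := st.al + (if st.wal then st.wlen else 0)
                  wlen := 0
                  wan := false
                  wal := false
                  pend := true } := by
            simp [gqfStep, gqfFlushW, hnl, hws, hw0]
          rw [gqf_split0_go_acc]
          obtain ⟨e1, e2, e3, e4, e5, e6⟩ :=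
            ih f hrf [] (c :: curL) (gqfStep st c) (by simp [hstN]) (by simp [hstN, gqfAN])
              (by simp [hstN, gqfAL]) (by simp [hstN, gqfDots, hws, h4])
              (by simp [hstN, gqfHead, hws])
          refine ⟨?_, ?_, ?_, ?_, ?_, ?_⟩ <;>
            simp only [e1, e2, e3, e4, e5, e6] <;>
            simp [hstN, List.countP_cons, List.filter_cons,
              h1, h2, h3, gqfAN_reverse, gqfAL_reverse] <;>
            (first | omega | (split_ifs <;> simp_all <;> omega))
      · -- ordinary character: extend the current word and the line's dot run
        have hws' : PySem.Chars.isspace c = false := by simpa using hws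
        rw [if_neg (show ¬(PySem.Chars.isspace c = true) by simp [hws'])]
        have hstN : gqfStep st c =
            { st with
                wlen := st.wlen + 1
                wan := st.wan || PySem.Chars.isalnum c
                wal := st.wal || PySem.Chars.isalpha c
                dots := if c = '.' then (if st.pend then 1 else st.dots + 1) else 0
                pend := false } := by
          simp [gqfStep, hnl, hws]
        have hdots : (if c = '.' then (if st.pend then 1 else st.dots + 1) else 0) = gqfDots (c :: curL) := by
          by_cases hc : c = '.'
          · subst hc
            rw [gqfDots, List.dropWhile_cons]
            simp only [show PySem.Chars.isspace '.' = false from by decide, Bool.false_eq_true, if_false]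
            rw [List.takeWhile_cons]
            simp only [BEq.rfl]
            by_cases hp : st.pend = true
            · -- pending whitespace: the head of curL is whitespace, so its dot run is empty
              have hph : gqfHead curL = true := by rw [← h5]; exact hp
              cases curL with
              | nil => simp [gqfHead] at hph
              | cons x xs =>
                have hx : PySem.Chars.isspace x = true := by simpa [gqfHead] using hph
                have hxd : (x == '.') = false := by
                  cases hy : (x == '.')
                  · rfl
                  · have h' := eq_of_beq hy; rw [h'] at hx; exact absurd hx (by decide)
                rw [if_pos trivial, if_pos trivial]
                simp [hp, hxd]
            · have hp' : st.pend = false := by simpa using hp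
              have hcl : curL.dropWhile PySem.Chars.isspace = curL := by
                cases curL with
                | nil => rfl
                | cons x xs =>
                  have hx : PySem.Chars.isspace x = false := by
                    rw [h5] at hp'; simpa [gqfHead] using hp'
                  simp [hx]
              rw [hp', h4, gqfDots, hcl]
              simp
          · rw [gqfDots, List.dropWhile_cons, hws']
            simp only [Bool.false_eq_true, if_false]
            rw [List.takeWhile_cons]
            have hcd : (c == '.') = false := beq_eq_false_iff_ne.mpr hc
            simp [hcd, hc]
        rw [hstN]
        exact ih f hrf (c :: curW) (c :: curL) _
          (by simp [h1]) (by simp [gqfAN, h2, Bool.or_comm])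
          (by simp [gqfAL, h3, Bool.or_comm])
          (by simpa using hdots) (by simp [gqfHead, hws'])

-- final comparison chain: A's if-chain over the counts equals B's conjunction
theorem gqf_chain (n s c L e m : Nat) (hs : s ≤ n) (hc : c ≤ n) (hme : m = 0 → e = 0) :
    (if n = 0 then false else
     if s < 50 ∨ s > 100000 then false else
     if c ≠ 0 ∧ (L < 3 * c ∨ L > 10 * c) then false else
     if m ≠ 0 ∧ 10 * e > 3 * m then false else
     if 5 * c < 4 * n then false else true)
    = (decide (0 < n) && decide (50 ≤ s ∧ s ≤ 100000) &&
       ((c == 0) || decide (3 * c ≤ L ∧ L ≤ 10 * c)) &&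
       decide (10 * e ≤ 3 * m) &&
       decide (4 * n ≤ 5 * c)) := by
  split_ifs <;> simp_all <;> omega

theorem gqf_len_nil {α : Type} (l : List α) : (l ≠ []) ↔ (l.length ≠ 0) := by
  rw [Ne, Ne, ← List.length_eq_zero_iff]

-- ===== VERDICT (by name: the statement is the Claim_ definition above) =====
theorem gopher_quality_filter_spec : Claim_equal_gopher_quality_filter := by
  intro text _
  unfold Spec_gopher_quality_filter gopher_quality_filter gopher_quality_filter_alt
  obtain ⟨e1, e2, e3, e4, e5, e6⟩ :=
    gqf_main text.toList (text.toList.length + 1) (by omega) [] [] gqfInit rfl rfl rfl rfl rfl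
  simp only [gqfInit, Nat.zero_add] at e1 e2 e3 e4 e5 e6
  have hAN : (fun (l : List Char) => List.any l PySem.Chars.isalnum) = gqfAN := rfl
  have hAL : (fun (l : List Char) => List.any l PySem.Chars.isalpha) = gqfAL := rfl
  have hEll : (fun (line : List Char) =>
      PySem.Chars.endswith (PySem.Chars.rstrip line) ['.', '.', '.']) = gqfEll := rfl
  have hlen : (fun (l : List Char) => l.length) = List.length := rfl
  have hmap : PySem.Str.split₀ text = (PySem.Chars.split₀.go text.toList [] []).map String.ofList := rfl
  have hlines : PySem.Chars.splitOn text.toList ['\n'] =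
      PySem.Chars.splitOn.go ['\n'] (text.toList.length + 1) text.toList [] [] := rfl
  have hdots3 : ("...".toList) = ['.', '.', '.'] := by decide
  rw [hmap, hlines, hdots3]
  simp only [gqfInit, List.length_map, List.filter_map, List.map_map,
    ← List.countP_eq_length_filter, List.countP_map, Function.comp_def, String.toList_ofList,
    hAN, hAL, hEll, hlen, gqf_len_nil, e1, e2, e3, e4, e5, e6]
  exact gqf_chain _ _ _ _ _ _ List.countP_le_length List.countP_le_length (by intro h; omega)
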